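-- pv_equiv track=rewrite | github.com/DhruvAjayToshniwal/Battleship | backend/app/engine/ai/probability.py | build_probability_grid
-- ===== SOURCE A (Python) =====
-- BOARD_SIZE = 10
--
-- HIT_BONUS_MULTIPLIER = 5
--
-- def build_probability_grid(
-- 	board_state: list[list[int]],
-- 	remaining_ships: list[int],
-- 	miss_cells: set[tuple[int, int]],
-- 	sunk_coords: set[tuple[int, int]],
-- 	hit_cells: set[tuple[int, int]],
-- ) -> list[list[int]]:
-- 	"""
-- 	Build a probability density grid for the given board state.
--
-- 	Args:
-- 		board_state: 10x10 grid (0=unknown, -1=miss, 1=hit).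
-- 		remaining_ships: List of ship lengths still alive.
-- 		miss_cells: Set of (row, col) known misses.
-- 		sunk_coords: Set of (row, col) belonging to sunk ships.
-- 		hit_cells: Set of (row, col) with confirmed hits (not yet sunk).
--
-- 	Returns:
-- 		10x10 grid of integer probability scores.
-- 	"""
-- 	grid = [[0] * BOARD_SIZE for _ in range(BOARD_SIZE)]
-- 	unsunk_hits = hit_cells - sunk_coords
--
-- 	for ship_len in remaining_ships:
-- 		for r in range(BOARD_SIZE):
-- 			for c in range(BOARD_SIZE - ship_len + 1):
-- 				cells = [(r, c + i) for i in range(ship_len)]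
-- 				if placement_valid(cells, miss_cells, sunk_coords):
-- 					weight = placement_weight(cells, unsunk_hits)
-- 					for cr, cc in cells:
-- 						grid[cr][cc] += weight
--
-- 		for r in range(BOARD_SIZE - ship_len + 1):
-- 			for c in range(BOARD_SIZE):
-- 				cells = [(r + i, c) for i in range(ship_len)]
-- 				if placement_valid(cells, miss_cells, sunk_coords):
-- 					weight = placement_weight(cells, unsunk_hits)
-- 					for cr, cc in cells:
-- 						grid[cr][cc] += weight
--
-- 	for r, c in miss_cells | sunk_coords:
-- 		if 0 <= r < BOARD_SIZE and 0 <= c < BOARD_SIZE: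
-- 			grid[r][c] = 0
--
-- 	return grid
--
-- def placement_valid(
-- 	cells: list[tuple[int, int]],
-- 	miss_cells: set[tuple[int, int]],
-- 	sunk_coords: set[tuple[int, int]],
-- ) -> bool:
-- 	"""
-- 	Check if a ship placement is valid — no cell overlaps a miss or sunk coord.
-- 	"""
-- 	for cell in cells:
-- 		if cell in miss_cells or cell in sunk_coords:
-- 			return False
-- 	return True
--
-- def placement_weight(
-- 	cells: list[tuple[int, int]],
-- 	unsunk_hits: set[tuple[int, int]],
-- ) -> int:
-- 	"""
-- 	Weight a placement higher if it passes through unsunk hit cells.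
--
-- 	A placement touching hits is much more likely to be the actual ship
-- 	location, so we multiply its contribution to the probability grid.
-- 	"""
-- 	hit_count = sum(1 for cell in cells if cell in unsunk_hits)
-- 	if hit_count > 0:
-- 		return 1 + hit_count * HIT_BONUS_MULTIPLIER
-- 	return 1
-- ===== SOURCE B (Python) =====
-- BOARD_SIZE = 10
--
-- HIT_BONUS_MULTIPLIER = 5
--
-- def build_probability_grid(
--     board_state,
--     remaining_ships,
--     miss_cells,
--     sunk_coords,
--     hit_cells,
-- ):
--     """Per-cell direct computation: each cell's score is the sum of the
--     weights of the valid placements covering it, found via start-index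
--     windows; no shared mutable grid and no final zeroing pass."""
--
--     def is_blocked(cell):
--         return cell in miss_cells or cell in sunk_coords
--
--     def is_unsunk_hit(cell):
--         return cell in hit_cells and cell not in sunk_coords
--
--     def line_weight(cells):
--         # weight of one placement, or 0 if it overlaps a miss/sunk cell
--         if any(is_blocked(x) for x in cells):
--             return 0
--         hits = sum(1 for x in cells if is_unsunk_hit(x))
--         return 1 + hits * HIT_BONUS_MULTIPLIER if hits > 0 else 1
--
--     def cell_score(r, c):
--         total = 0
--         for L in remaining_ships:
--             for c0 in range(max(0, c - L + 1), min(c, BOARD_SIZE - L) + 1):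
--                 total += line_weight([(r, c0 + i) for i in range(L)])
--             for r0 in range(max(0, r - L + 1), min(r, BOARD_SIZE - L) + 1):
--                 total += line_weight([(r0 + i, c) for i in range(L)])
--         return total
--
--     return [
--         [0 if is_blocked((r, c)) else cell_score(r, c) for c in range(BOARD_SIZE)]
--         for r in range(BOARD_SIZE)
--     ]
-- ===== Notes on version B (the rewrite author's own statement) =====
-- stated objective: alternative
-- what changed: B computes each cell's value directly as the sum of weights of the valid placements covering it (start-index windows per ship length), instead of A's accumulation into a shared mutable grid over all placements followed by a zeroing pass over miss/sunk cells.
import Mathlib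
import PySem

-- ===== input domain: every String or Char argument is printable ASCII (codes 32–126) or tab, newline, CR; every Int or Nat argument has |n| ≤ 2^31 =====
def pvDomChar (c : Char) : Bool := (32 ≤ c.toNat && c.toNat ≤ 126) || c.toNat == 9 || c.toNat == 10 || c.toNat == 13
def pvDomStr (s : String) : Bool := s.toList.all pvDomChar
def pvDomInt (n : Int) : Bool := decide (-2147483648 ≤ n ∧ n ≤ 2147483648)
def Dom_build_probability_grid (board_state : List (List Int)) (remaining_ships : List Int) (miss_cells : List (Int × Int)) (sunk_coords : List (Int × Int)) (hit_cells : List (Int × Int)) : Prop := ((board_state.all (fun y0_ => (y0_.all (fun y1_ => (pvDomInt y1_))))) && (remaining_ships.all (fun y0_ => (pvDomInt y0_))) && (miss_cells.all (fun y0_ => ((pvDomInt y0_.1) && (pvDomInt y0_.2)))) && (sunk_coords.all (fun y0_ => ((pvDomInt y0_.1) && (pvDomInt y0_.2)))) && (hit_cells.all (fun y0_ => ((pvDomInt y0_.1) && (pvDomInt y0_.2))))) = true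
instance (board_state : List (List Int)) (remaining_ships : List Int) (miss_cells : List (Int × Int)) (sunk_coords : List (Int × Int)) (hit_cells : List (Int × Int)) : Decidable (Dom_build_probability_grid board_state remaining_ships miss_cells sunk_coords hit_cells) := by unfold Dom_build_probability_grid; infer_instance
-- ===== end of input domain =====

-- B re-implements the grid per cell: each cell's score is the direct sum of the weights of the
-- valid placements covering it (found via start-index windows), with no shared mutable grid and
-- no final zeroing pass; same values, a different decomposition (objective: alternative).

-- ===== PORT A =====
def pvValid (cells : List (Int × Int)) (miss sunk : List (Int × Int)) : Bool :=
  cells.all (fun cell => !(miss.contains cell || sunk.contains cell))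

def pvWeight (cells unsunk : List (Int × Int)) : Int :=
  let hit_count := cells.foldl (fun a x => if unsunk.contains x then a + 1 else a) (0 : Int)
  if hit_count > 0 then 1 + hit_count * 5 else 1

-- grid[r][c] += w ; exact: A only ever indexes with r, c drawn from range(10), so toNat never clamps
def pvAdd (g : List (List Int)) (r c w : Int) : List (List Int) :=
  g.modify r.toNat (fun row => row.modify c.toNat (fun v => v + w))

-- grid[r][c] = 0 ; exact: guarded by 0 <= r < 10 and 0 <= c < 10 at the call site
def pvZero (g : List (List Int)) (r c : Int) : List (List Int) :=
  g.modify r.toNat (fun row => row.set c.toNat 0)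

def pvHCells (r c L : Int) : List (Int × Int) :=
  (PySem.List.pyRange 0 L).map (fun i => (r, c + i))

def pvVCells (r c L : Int) : List (Int × Int) :=
  (PySem.List.pyRange 0 L).map (fun i => (r + i, c))

def pvShipsFold (miss sunk unsunk : List (Int × Int)) (ships : List Int) (g0 : List (List Int)) : List (List Int) :=
  ships.foldl (fun g ship_len =>
    let g2 := (PySem.List.pyRange 0 10).foldl (fun g r =>
      (PySem.List.pyRange 0 (10 - ship_len + 1)).foldl (fun g c =>
        let cells := pvHCells r c ship_len
        if pvValid cells miss sunk then
          let w := pvWeight cells unsunk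
          cells.foldl (fun g p => pvAdd g p.1 p.2 w) g
        else g) g) g
    (PySem.List.pyRange 0 (10 - ship_len + 1)).foldl (fun g r =>
      (PySem.List.pyRange 0 10).foldl (fun g c =>
        let cells := pvVCells r c ship_len
        if pvValid cells miss sunk then
          let w := pvWeight cells unsunk
          cells.foldl (fun g p => pvAdd g p.1 p.2 w) g
        else g) g) g2) g0

-- the final zeroing loop iterates a Python set union; every iteration writes the constant 0 to its
-- own cell, so the (unmodelled) hash iteration order cannot affect the result and a list fold is exact
def build_probability_grid (board_state : List (List Int)) (remaining_ships : List Int) (miss_cells : List (Int × Int)) (sunk_coords : List (Int × Int)) (hit_cells : List (Int × Int)) : List (List Int) :=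
  let grid0 := List.replicate 10 (List.replicate 10 (0 : Int))
  let unsunk_hits := PySem.Set.diff hit_cells sunk_coords
  let grid1 := pvShipsFold miss_cells sunk_coords unsunk_hits remaining_ships grid0
  (PySem.Set.union miss_cells sunk_coords).foldl (fun g p =>
    if 0 ≤ p.1 ∧ p.1 < 10 ∧ 0 ≤ p.2 ∧ p.2 < 10 then pvZero g p.1 p.2 else g) grid1

-- ===== PORT B =====
def pvBlocked (miss sunk : List (Int × Int)) (cell : Int × Int) : Bool :=
  miss.contains cell || sunk.contains cell

def pvUnsunkHit (hits sunk : List (Int × Int)) (cell : Int × Int) : Bool :=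
  hits.contains cell && !sunk.contains cell

def pvLineWeight (miss sunk hits : List (Int × Int)) (cells : List (Int × Int)) : Int :=
  if cells.any (pvBlocked miss sunk) then 0
  else
    let hits_n := cells.foldl (fun a x => if pvUnsunkHit hits sunk x then a + 1 else a) (0 : Int)
    if hits_n > 0 then 1 + hits_n * 5 else 1

def pvCellScore (ships : List Int) (miss sunk hits : List (Int × Int)) (r c : Int) : Int :=
  ships.foldl (fun total L =>
    let t2 := (PySem.List.pyRange (max 0 (c - L + 1)) (min c (10 - L) + 1)).foldl
      (fun t c0 => t + pvLineWeight miss sunk hits (pvHCells r c0 L)) total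
    (PySem.List.pyRange (max 0 (r - L + 1)) (min r (10 - L) + 1)).foldl
      (fun t r0 => t + pvLineWeight miss sunk hits (pvVCells r0 c L)) t2) 0

def build_probability_grid_alt (board_state : List (List Int)) (remaining_ships : List Int) (miss_cells : List (Int × Int)) (sunk_coords : List (Int × Int)) (hit_cells : List (Int × Int)) : List (List Int) :=
  (PySem.List.pyRange 0 10).map (fun r =>
    (PySem.List.pyRange 0 10).map (fun c =>
      if pvBlocked miss_cells sunk_coords (r, c) then 0
      else pvCellScore remaining_ships miss_cells sunk_coords hit_cells r c))

-- ===== PRECONDITION & SPEC =====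
def Spec_build_probability_grid (board_state : List (List Int)) (remaining_ships : List Int) (miss_cells : List (Int × Int)) (sunk_coords : List (Int × Int)) (hit_cells : List (Int × Int)) (out : List (List Int)) : Prop := out = build_probability_grid_alt board_state remaining_ships miss_cells sunk_coords hit_cells
instance (board_state : List (List Int)) (remaining_ships : List Int) (miss_cells : List (Int × Int)) (sunk_coords : List (Int × Int)) (hit_cells : List (Int × Int)) (out : List (List Int)) : Decidable (Spec_build_probability_grid board_state remaining_ships miss_cells sunk_coords hit_cells out) := by unfold Spec_build_probability_grid; infer_instance

-- ===== CLAIM (what is proved, stated in full; the proofs are below) =====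
def Claim_equal_build_probability_grid : Prop := ∀ (board_state : List (List Int)) (remaining_ships : List Int) (miss_cells : List (Int × Int)) (sunk_coords : List (Int × Int)) (hit_cells : List (Int × Int)), Dom_build_probability_grid board_state remaining_ships miss_cells sunk_coords hit_cells → Spec_build_probability_grid board_state remaining_ships miss_cells sunk_coords hit_cells (build_probability_grid board_state remaining_ships miss_cells sunk_coords hit_cells)

-- ===== LEMMAS AND PROOFS =====

-- events: one contribution (cell, weight) per covered cell of a valid placement
def pvStep (g : List (List Int)) (e : (Int × Int) × Int) : List (List Int) :=
  pvAdd g e.1.1 e.1.2 e.2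

def pvGet (g : List (List Int)) (r c : Int) : Int :=
  (g.getD r.toNat []).getD c.toNat 0

def pvShape (g : List (List Int)) : Prop :=
  g.length = 10 ∧ ∀ n : Nat, n < 10 → (g.getD n []).length = 10

def pvSumAt (E : List ((Int × Int) × Int)) (r c : Int) : Int :=
  (E.map (fun e => if e.1 = (r, c) then e.2 else 0)).sum

def pvPlaceEv (miss sunk unsunk : List (Int × Int)) (cells : List (Int × Int)) : List ((Int × Int) × Int) :=
  if pvValid cells miss sunk then cells.map (fun p => (p, pvWeight cells unsunk)) else []

def pvHEvs (miss sunk unsunk : List (Int × Int)) (L : Int) : List ((Int × Int) × Int) :=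
  (PySem.List.pyRange 0 10).flatMap (fun r =>
    (PySem.List.pyRange 0 (10 - L + 1)).flatMap (fun c =>
      pvPlaceEv miss sunk unsunk (pvHCells r c L)))

def pvVEvs (miss sunk unsunk : List (Int × Int)) (L : Int) : List ((Int × Int) × Int) :=
  (PySem.List.pyRange 0 (10 - L + 1)).flatMap (fun r =>
    (PySem.List.pyRange 0 10).flatMap (fun c =>
      pvPlaceEv miss sunk unsunk (pvVCells r c L)))

def pvAllEvs (miss sunk unsunk : List (Int × Int)) (ships : List Int) : List ((Int × Int) × Int) :=
  ships.flatMap (fun L => pvHEvs miss sunk unsunk L ++ pvVEvs miss sunk unsunk L)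

-- basic pyRange facts
lemma pvRange_empty {a b : Int} (h : b ≤ a) : PySem.List.pyRange a b = [] := by
  rw [PySem.List.pyRange_of_pos a b (by norm_num : (0:Int) < 1)]
  simp [show ¬ a < b by omega]

lemma pvRange_nodup (a b : Int) : (PySem.List.pyRange a b).Nodup := by
  rw [PySem.List.pyRange_of_pos a b (by norm_num : (0:Int) < 1)]
  exact List.Nodup.map (fun x y h => by omega) List.nodup_range

-- getD/modify plumbing
lemma pvGetD_modify {α : Type} (g : List α) (d : α) (i : Nat) (f : α → α) (n : Nat) :
    (g.modify i f).getD n d = if i = n ∧ n < g.length then f (g.getD n d) else g.getD n d := by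
  rw [List.getD_eq_getElem?_getD, List.getD_eq_getElem?_getD, List.getElem?_modify]
  by_cases hn : n < g.length
  · rw [List.getElem?_eq_getElem hn]
    by_cases hin : i = n <;> simp [hin, hn]
  · rw [List.getElem?_eq_none (by omega)]
    simp [hn]

lemma pvGetD_set {α : Type} (row : List α) (d : α) (j : Nat) (v : α) (m : Nat) :
    (row.set j v).getD m d = if j = m ∧ m < row.length then v else row.getD m d := by
  rw [List.getD_eq_getElem?_getD, List.getD_eq_getElem?_getD, List.getElem?_set]
  by_cases hjm : j = m
  · subst hjm
    by_cases hm : j < row.length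
    · simp [hm]
    · rw [List.getElem?_eq_none (by omega)]
      simp [hm]
  · simp [hjm]

lemma pvShape_pvAdd {g : List (List Int)} (h : pvShape g) (r c w : Int) : pvShape (pvAdd g r c w) := by
  obtain ⟨h1, h2⟩ := h
  refine ⟨by simpa [pvAdd] using h1, fun n hn => ?_⟩
  rw [pvAdd, pvGetD_modify]
  split
  · rw [List.length_modify]; exact h2 n hn
  · exact h2 n hn

lemma pvShape_pvZero {g : List (List Int)} (h : pvShape g) (r c : Int) : pvShape (pvZero g r c) := by
  obtain ⟨h1, h2⟩ := h
  refine ⟨by simpa [pvZero] using h1, fun n hn => ?_⟩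
  rw [pvZero, pvGetD_modify]
  split
  · rw [List.length_set]; exact h2 n hn
  · exact h2 n hn

lemma pvGet_pvAdd {g : List (List Int)} (hg : pvShape g) {er ec : Int} (w : Int)
    (her : 0 ≤ er ∧ er < 10) (hec : 0 ≤ ec ∧ ec < 10) {r c : Int}
    (hr : 0 ≤ r ∧ r < 10) (hc : 0 ≤ c ∧ c < 10) :
    pvGet (pvAdd g er ec w) r c = pvGet g r c + (if ((er, ec) : Int × Int) = (r, c) then w else 0) := by
  obtain ⟨h1, h2⟩ := hg
  have hrl : r.toNat < g.length := by omega
  have hrow : (g.getD r.toNat []).length = 10 := h2 r.toNat (by omega)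
  rw [pvGet, pvGet, pvAdd, pvGetD_modify]
  by_cases hrr : er = r
  · rw [if_pos ⟨by omega, hrl⟩, pvGetD_modify]
    by_cases hcc : ec = c
    · rw [if_pos ⟨by omega, by omega⟩, if_pos (by rw [hrr, hcc])]
    · rw [if_neg (by rintro ⟨he, -⟩; exact hcc (by omega)),
        if_neg (by simp [Prod.ext_iff]; intro _ h; exact absurd h hcc)]
      ring
  · rw [if_neg (by rintro ⟨he, -⟩; exact hrr (by omega)),
      if_neg (by simp [Prod.ext_iff]; intro h; exact absurd h hrr)]
    ring

lemma pvGet_pvZero_self {g : List (List Int)} (hg : pvShape g) {r c : Int}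
    (hr : 0 ≤ r ∧ r < 10) (hc : 0 ≤ c ∧ c < 10) :
    pvGet (pvZero g r c) r c = 0 := by
  obtain ⟨h1, h2⟩ := hg
  have hrow : (g.getD r.toNat []).length = 10 := h2 r.toNat (by omega)
  rw [pvGet, pvZero, pvGetD_modify, if_pos ⟨rfl, by omega⟩, pvGetD_set]
  split
  · rfl
  · omega

lemma pvGet_pvZero_ne {g : List (List Int)} {p : Int × Int}
    (hp : 0 ≤ p.1 ∧ p.1 < 10 ∧ 0 ≤ p.2 ∧ p.2 < 10) {r c : Int}
    (hr : 0 ≤ r ∧ r < 10) (hc : 0 ≤ c ∧ c < 10) (hne : p ≠ (r, c)) :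
    pvGet (pvZero g p.1 p.2) r c = pvGet g r c := by
  rw [pvGet, pvGet, pvZero, pvGetD_modify]
  by_cases h1 : p.1 = r
  · have h2 : p.2 ≠ c := fun h => hne (Prod.ext h1 h)
    split
    · rw [pvGetD_set, if_neg (by rintro ⟨he, -⟩; exact h2 (by omega))]
    · rfl
  · rw [if_neg (by rintro ⟨he, -⟩; exact h1 (by omega))]

-- the event fold computes, at each in-range cell, the sum of the weights of events at that cell
lemma pvFold_char (E : List ((Int × Int) × Int))
    (hE : ∀ e ∈ E, 0 ≤ e.1.1 ∧ e.1.1 < 10 ∧ 0 ≤ e.1.2 ∧ e.1.2 < 10) :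
    ∀ g : List (List Int), pvShape g →
      pvShape (E.foldl pvStep g) ∧
      ∀ r c : Int, (0 ≤ r ∧ r < 10) → (0 ≤ c ∧ c < 10) →
        pvGet (E.foldl pvStep g) r c = pvGet g r c + pvSumAt E r c := by
  induction E with
  | nil => intro g hg; exact ⟨hg, fun r c _ _ => by simp [pvSumAt]⟩
  | cons e E ih =>
    intro g hg
    have he := hE e List.mem_cons_self
    have hg' : pvShape (pvStep g e) := pvShape_pvAdd hg _ _ _
    obtain ⟨hsh, hval⟩ := ih (fun x hx => hE x (List.mem_cons_of_mem _ hx)) (pvStep g e) hg'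
    refine ⟨hsh, fun r c hr hc => ?_⟩
    rw [List.foldl_cons, hval r c hr hc, pvStep,
      pvGet_pvAdd hg e.2 ⟨he.1, he.2.1⟩ ⟨he.2.2.1, he.2.2.2⟩ hr hc]
    simp only [pvSumAt, List.map_cons, List.sum_cons]
    ring

lemma pvZeroFold_char (Z : List (Int × Int)) :
    ∀ g : List (List Int), pvShape g →
      pvShape (Z.foldl (fun g p =>
        if 0 ≤ p.1 ∧ p.1 < 10 ∧ 0 ≤ p.2 ∧ p.2 < 10 then pvZero g p.1 p.2 else g) g) ∧
      ∀ r c : Int, (0 ≤ r ∧ r < 10) → (0 ≤ c ∧ c < 10) →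
        pvGet (Z.foldl (fun g p =>
          if 0 ≤ p.1 ∧ p.1 < 10 ∧ 0 ≤ p.2 ∧ p.2 < 10 then pvZero g p.1 p.2 else g) g) r c =
        if ((r, c) : Int × Int) ∈ Z then 0 else pvGet g r c := by
  induction Z with
  | nil => intro g hg; exact ⟨hg, fun r c _ _ => by simp⟩
  | cons p Z ih =>
    intro g hg
    have hg' : pvShape (if 0 ≤ p.1 ∧ p.1 < 10 ∧ 0 ≤ p.2 ∧ p.2 < 10 then pvZero g p.1 p.2 else g) := by
      split
      · exact pvShape_pvZero hg _ _
      · exact hg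
    obtain ⟨hsh, hval⟩ := ih _ hg'
    refine ⟨hsh, fun r c hr hc => ?_⟩
    rw [List.foldl_cons, hval r c hr hc]
    by_cases hmem : ((r, c) : Int × Int) ∈ Z
    · simp [hmem]
    · rw [if_neg hmem]
      by_cases hp : p = (r, c)
      · subst hp
        rw [if_pos (show (0:Int) ≤ r ∧ r < 10 ∧ (0:Int) ≤ c ∧ c < 10 from ⟨hr.1, hr.2, hc.1, hc.2⟩),
          pvGet_pvZero_self hg hr hc,
          if_pos (show ((r, c) : Int × Int) ∈ (r, c) :: Z from List.mem_cons_self)]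
      · rw [if_neg (show ¬ (((r, c) : Int × Int) ∈ p :: Z) from by
          rw [List.mem_cons]; rintro (h | h); exact hp h.symm; exact hmem h)]
        split
        · rename_i hcond
          exact pvGet_pvZero_ne hcond hr hc hp
        · rfl

-- sums of per-event contributions
lemma pvSumAt_append (E F : List ((Int × Int) × Int)) (r c : Int) :
    pvSumAt (E ++ F) r c = pvSumAt E r c + pvSumAt F r c := by
  simp [pvSumAt]

lemma pvSumAt_flatMap {α : Type} (l : List α) (f : α → List ((Int × Int) × Int)) (r c : Int) :
    pvSumAt (l.flatMap f) r c = (l.map (fun x => pvSumAt (f x) r c)).sum := by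
  induction l with
  | nil => simp [pvSumAt]
  | cons a l ih => rw [List.flatMap_cons, pvSumAt_append, ih]; simp

lemma pvSum_map_delta (l : List Int) (hnd : l.Nodup) (a : Int) (ha : a ∈ l) (f : Int → Int) :
    (l.map (fun x => if x = a then f x else 0)).sum = f a := by
  induction l with
  | nil => cases ha
  | cons b l ih =>
    rw [List.map_cons, List.sum_cons]
    by_cases h : b = a
    · rw [if_pos h]
      have hz : ∀ x ∈ l.map (fun x => if x = a then f x else 0), x = 0 := by
        intro x hx
        obtain ⟨y, hy, rfl⟩ := List.mem_map.mp hx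
        rw [if_neg]
        rintro rfl
        exact (List.nodup_cons.mp hnd).1 (by rwa [h])
      rw [List.sum_eq_zero hz, h]
      ring
    · have ha' : a ∈ l := by
        rcases List.mem_cons.mp ha with h' | h'
        · exact absurd h'.symm h
        · exact h'
      rw [if_neg h, ih (List.nodup_cons.mp hnd).2 ha']
      ring

lemma pvSum_map_ite_filter {α : Type} (l : List α) (P : α → Prop) [DecidablePred P] (f : α → Int) :
    (l.map (fun x => if P x then f x else 0)).sum = ((l.filter (fun x => decide (P x))).map f).sum := by
  induction l with
  | nil => simp
  | cons a l ih =>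
    by_cases h : P a <;> simp [h, ih]

lemma pvSum_map_ite_const {α : Type} (l : List α) (P : Prop) [Decidable P] (f : α → Int) :
    (l.map (fun x => if P then f x else 0)).sum = if P then (l.map f).sum else 0 := by
  by_cases h : P <;> simp [h]

-- filtering a unit-step range by an interval predicate yields the clipped range
lemma pvRange_filter_interval (lo hi : Int) : ∀ a b : Int,
    (PySem.List.pyRange a b).filter (fun x => decide (lo ≤ x ∧ x < hi)) =
    PySem.List.pyRange (max a lo) (min b hi) := by
  have key : ∀ n : Nat, ∀ a b : Int, (b - a).toNat ≤ n →
      (PySem.List.pyRange a b).filter (fun x => decide (lo ≤ x ∧ x < hi)) =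
      PySem.List.pyRange (max a lo) (min b hi) := by
    intro n
    induction n with
    | zero =>
      intro a b h
      rw [pvRange_empty (show b ≤ a by omega), List.filter_nil,
        pvRange_empty (show min b hi ≤ max a lo from
          le_trans (min_le_left _ _) (le_trans (by omega) (le_max_left _ _)))]
    | succ n ih =>
      intro a b h
      by_cases hab : a < b
      · rw [PySem.List.pyRange_one_cons hab, List.filter_cons]
        by_cases hP : lo ≤ a ∧ a < hi
        · rw [if_pos (by simpa using hP), ih (a + 1) b (by omega),
            show max (a + 1) lo = a + 1 from max_eq_left (by omega),
            show max a lo = a from max_eq_left (by omega)]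
          exact (PySem.List.pyRange_one_cons (show a < min b hi from
            lt_min_iff.mpr ⟨hab, hP.2⟩)).symm
        · rw [if_neg (by simpa using hP), ih (a + 1) b (by omega)]
          rcases not_and_or.mp hP with h' | h'
          · rw [show max (a + 1) lo = lo from max_eq_right (by omega),
              show max a lo = lo from max_eq_right (by omega)]
          · rw [pvRange_empty (show min b hi ≤ max (a + 1) lo from
                le_trans (min_le_right _ _) (le_trans (by omega) (le_max_left _ _))),
              pvRange_empty (show min b hi ≤ max a lo from
                le_trans (min_le_right _ _) (le_trans (by omega) (le_max_left _ _)))]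
      · rw [pvRange_empty (show b ≤ a by omega), List.filter_nil,
          pvRange_empty (show min b hi ≤ max a lo from
            le_trans (min_le_left _ _) (le_trans (by omega) (le_max_left _ _)))]
  intro a b
  exact key (b - a).toNat a b le_rfl

-- per-placement delta sums
lemma pvHLine_sum (r' c' L r c w : Int) :
    ((pvHCells r' c' L).map (fun p => if p = (r, c) then w else 0)).sum =
    if r' = r ∧ (c - L + 1 ≤ c' ∧ c' < c + 1) then w else 0 := by
  rw [pvHCells, List.map_map]
  by_cases hrr : r' = r
  · subst hrr
    by_cases hwin : c - L + 1 ≤ c' ∧ c' < c + 1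
    · have hmem : c - c' ∈ PySem.List.pyRange 0 L := PySem.List.mem_pyRange_one.mpr (by omega)
      rw [if_pos ⟨rfl, hwin⟩]
      have : ((PySem.List.pyRange 0 L).map ((fun p => if p = (r', c) then w else 0) ∘ fun i => (r', c' + i))) =
          (PySem.List.pyRange 0 L).map (fun i => if i = c - c' then w else 0) := by
        apply List.map_congr_left
        intro i _
        simp only [Function.comp, Prod.mk.injEq, true_and]
        by_cases h : i = c - c'
        · rw [if_pos (by omega), if_pos h]
        · rw [if_neg (by omega), if_neg h]
      rw [this, pvSum_map_delta _ (pvRange_nodup 0 L) (c - c') hmem]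
    · rw [if_neg (by tauto)]
      apply List.sum_eq_zero
      intro x hx
      obtain ⟨i, hi, rfl⟩ := List.mem_map.mp hx
      have := PySem.List.mem_pyRange_one.mp hi
      simp only [Function.comp, Prod.mk.injEq, true_and]
      rw [if_neg (by omega)]
  · rw [if_neg (by tauto)]
    apply List.sum_eq_zero
    intro x hx
    obtain ⟨i, hi, rfl⟩ := List.mem_map.mp hx
    simp only [Function.comp, Prod.mk.injEq]
    rw [if_neg (by rintro ⟨h, -⟩; exact hrr h)]

lemma pvVLine_sum (r' c' L r c w : Int) :
    ((pvVCells r' c' L).map (fun p => if p = (r, c) then w else 0)).sum =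
    if c' = c ∧ (r - L + 1 ≤ r' ∧ r' < r + 1) then w else 0 := by
  rw [pvVCells, List.map_map]
  by_cases hcc : c' = c
  · subst hcc
    by_cases hwin : r - L + 1 ≤ r' ∧ r' < r + 1
    · have hmem : r - r' ∈ PySem.List.pyRange 0 L := PySem.List.mem_pyRange_one.mpr (by omega)
      rw [if_pos ⟨rfl, hwin⟩]
      have : ((PySem.List.pyRange 0 L).map ((fun p => if p = (r, c') then w else 0) ∘ fun i => (r' + i, c'))) =
          (PySem.List.pyRange 0 L).map (fun i => if i = r - r' then w else 0) := by
        apply List.map_congr_left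
        intro i _
        simp only [Function.comp, Prod.mk.injEq, and_true]
        by_cases h : i = r - r'
        · rw [if_pos (by omega), if_pos h]
        · rw [if_neg (by omega), if_neg h]
      rw [this, pvSum_map_delta _ (pvRange_nodup 0 L) (r - r') hmem]
    · rw [if_neg (by tauto)]
      apply List.sum_eq_zero
      intro x hx
      obtain ⟨i, hi, rfl⟩ := List.mem_map.mp hx
      have := PySem.List.mem_pyRange_one.mp hi
      simp only [Function.comp, Prod.mk.injEq, and_true]
      rw [if_neg (by omega)]
  · rw [if_neg (by tauto)]
    apply List.sum_eq_zero
    intro x hx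
    obtain ⟨i, hi, rfl⟩ := List.mem_map.mp hx
    simp only [Function.comp, Prod.mk.injEq]
    rw [if_neg (by rintro ⟨-, h⟩; exact hcc h)]

lemma pvSumAt_placeEv_h (miss sunk unsunk : List (Int × Int)) (r' c' L r c : Int) :
    pvSumAt (pvPlaceEv miss sunk unsunk (pvHCells r' c' L)) r c =
    if r' = r ∧ (c - L + 1 ≤ c' ∧ c' < c + 1) then
      (if pvValid (pvHCells r' c' L) miss sunk then pvWeight (pvHCells r' c' L) unsunk else 0)
    else 0 := by
  rw [pvPlaceEv]
  split
  · rw [pvSumAt, List.map_map]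
    have : ((fun e => if e.1 = (r, c) then e.2 else (0:Int)) ∘ fun p => (p, pvWeight (pvHCells r' c' L) unsunk)) =
        fun p => if p = (r, c) then pvWeight (pvHCells r' c' L) unsunk else 0 := rfl
    rw [this, pvHLine_sum]
  · simp [pvSumAt]

lemma pvSumAt_placeEv_v (miss sunk unsunk : List (Int × Int)) (r' c' L r c : Int) :
    pvSumAt (pvPlaceEv miss sunk unsunk (pvVCells r' c' L)) r c =
    if c' = c ∧ (r - L + 1 ≤ r' ∧ r' < r + 1) then
      (if pvValid (pvVCells r' c' L) miss sunk then pvWeight (pvVCells r' c' L) unsunk else 0)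
    else 0 := by
  rw [pvPlaceEv]
  split
  · rw [pvSumAt, List.map_map]
    have : ((fun e => if e.1 = (r, c) then e.2 else (0:Int)) ∘ fun p => (p, pvWeight (pvVCells r' c' L) unsunk)) =
        fun p => if p = (r, c) then pvWeight (pvVCells r' c' L) unsunk else 0 := rfl
    rw [this, pvVLine_sum]
  · simp [pvSumAt]

-- B's line weight is A's "0 if invalid, else weight", with the membership tests inlined
lemma pvLineWeight_eq (miss sunk hits : List (Int × Int)) (cells : List (Int × Int)) :
    pvLineWeight miss sunk hits cells =
    if pvValid cells miss sunk then pvWeight cells (PySem.Set.diff hits sunk) else 0 := by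
  have hcontains : ∀ x : Int × Int, (PySem.Set.diff hits sunk).contains x = pvUnsunkHit hits sunk x := by
    intro x
    by_cases h1 : x ∈ hits <;> by_cases h2 : x ∈ sunk <;>
      simp [PySem.Set.diff, pvUnsunkHit, List.contains_eq_mem, List.mem_filter, h1, h2]
  have hval : pvValid cells miss sunk = !cells.any (pvBlocked miss sunk) := by
    rw [pvValid, List.all_eq_not_any_not]
    simp only [Bool.not_not]
    rfl
  simp only [pvLineWeight, pvWeight, hval]
  cases h : cells.any (pvBlocked miss sunk) <;> simp [h, pvUnsunkHit]

-- horizontal part: the event sum over all placements collapses to B's window sum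
lemma pvHSum (miss sunk unsunk : List (Int × Int)) (L r c : Int)
    (hr : 0 ≤ r ∧ r < 10) (hc : 0 ≤ c ∧ c < 10) :
    pvSumAt (pvHEvs miss sunk unsunk L) r c =
    ((PySem.List.pyRange (max 0 (c - L + 1)) (min c (10 - L) + 1)).map
      (fun c0 => if pvValid (pvHCells r c0 L) miss sunk then pvWeight (pvHCells r c0 L) unsunk else 0)).sum := by
  rw [pvHEvs, pvSumAt_flatMap]
  have hrow : ∀ r' : Int, ((PySem.List.pyRange 0 (10 - L + 1)).map
      (fun c' => pvSumAt (pvPlaceEv miss sunk unsunk (pvHCells r' c' L)) r c)).sum =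
      if r' = r then ((PySem.List.pyRange 0 (10 - L + 1)).map
        (fun c' => if (c - L + 1 ≤ c' ∧ c' < c + 1) then
          (if pvValid (pvHCells r' c' L) miss sunk then pvWeight (pvHCells r' c' L) unsunk else 0)
        else 0)).sum else 0 := by
    intro r'
    rw [← pvSum_map_ite_const]
    congr 1
    apply List.map_congr_left
    intro c' _
    rw [pvSumAt_placeEv_h]
    by_cases h1 : r' = r <;> by_cases h2 : (c - L + 1 ≤ c' ∧ c' < c + 1) <;> simp [h1, h2]
  calc ((PySem.List.pyRange 0 10).map (fun r' => pvSumAt ((PySem.List.pyRange 0 (10 - L + 1)).flatMap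
          (fun c' => pvPlaceEv miss sunk unsunk (pvHCells r' c' L))) r c)).sum
      = ((PySem.List.pyRange 0 10).map (fun r' =>
          if r' = r then ((PySem.List.pyRange 0 (10 - L + 1)).map
            (fun c' => if (c - L + 1 ≤ c' ∧ c' < c + 1) then
              (if pvValid (pvHCells r' c' L) miss sunk then pvWeight (pvHCells r' c' L) unsunk else 0)
            else 0)).sum else 0)).sum := by
        apply congrArg
        apply List.map_congr_left
        intro r' _
        rw [pvSumAt_flatMap, hrow]
    _ = ((PySem.List.pyRange 0 (10 - L + 1)).map
          (fun c' => if (c - L + 1 ≤ c' ∧ c' < c + 1) then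
            (if pvValid (pvHCells r c' L) miss sunk then pvWeight (pvHCells r c' L) unsunk else 0)
          else 0)).sum := by
        apply pvSum_map_delta _ (pvRange_nodup 0 10) r (PySem.List.mem_pyRange_one.mpr (by omega))
    _ = _ := by
        rw [pvSum_map_ite_filter, pvRange_filter_interval (c - L + 1) (c + 1) 0 (10 - L + 1),
          show min (10 - L + 1) (c + 1) = min c (10 - L) + 1 by omega]

lemma pvVSum (miss sunk unsunk : List (Int × Int)) (L r c : Int)
    (hr : 0 ≤ r ∧ r < 10) (hc : 0 ≤ c ∧ c < 10) :
    pvSumAt (pvVEvs miss sunk unsunk L) r c =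
    ((PySem.List.pyRange (max 0 (r - L + 1)) (min r (10 - L) + 1)).map
      (fun r0 => if pvValid (pvVCells r0 c L) miss sunk then pvWeight (pvVCells r0 c L) unsunk else 0)).sum := by
  rw [pvVEvs, pvSumAt_flatMap]
  have hrow : ∀ r' : Int, ((PySem.List.pyRange 0 10).map
      (fun c' => pvSumAt (pvPlaceEv miss sunk unsunk (pvVCells r' c' L)) r c)).sum =
      if (r - L + 1 ≤ r' ∧ r' < r + 1) then
        (if pvValid (pvVCells r' c L) miss sunk then pvWeight (pvVCells r' c L) unsunk else 0)
      else 0 := by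
    intro r'
    have : ((PySem.List.pyRange 0 10).map
        (fun c' => pvSumAt (pvPlaceEv miss sunk unsunk (pvVCells r' c' L)) r c)).sum =
        ((PySem.List.pyRange 0 10).map (fun c' => if c' = c then
          (if (r - L + 1 ≤ r' ∧ r' < r + 1) then
            (if pvValid (pvVCells r' c' L) miss sunk then pvWeight (pvVCells r' c' L) unsunk else 0)
          else 0) else 0)).sum := by
      congr 1
      apply List.map_congr_left
      intro c' _
      rw [pvSumAt_placeEv_v]
      by_cases h1 : c' = c <;> by_cases h2 : (r - L + 1 ≤ r' ∧ r' < r + 1) <;> simp [h1, h2]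
    rw [this, pvSum_map_delta _ (pvRange_nodup 0 10) c (PySem.List.mem_pyRange_one.mpr (by omega))]
  calc ((PySem.List.pyRange 0 (10 - L + 1)).map (fun r' => pvSumAt ((PySem.List.pyRange 0 10).flatMap
          (fun c' => pvPlaceEv miss sunk unsunk (pvVCells r' c' L))) r c)).sum
      = ((PySem.List.pyRange 0 (10 - L + 1)).map (fun r' =>
          if (r - L + 1 ≤ r' ∧ r' < r + 1) then
            (if pvValid (pvVCells r' c L) miss sunk then pvWeight (pvVCells r' c L) unsunk else 0)
          else 0)).sum := by
        apply congrArg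
        apply List.map_congr_left
        intro r' _
        rw [pvSumAt_flatMap, hrow]
    _ = _ := by
        rw [pvSum_map_ite_filter, pvRange_filter_interval (r - L + 1) (r + 1) 0 (10 - L + 1),
          show min (10 - L + 1) (r + 1) = min r (10 - L) + 1 by omega]

-- B's per-cell score is exactly the event sum at that cell
lemma pvCellScore_eq (ships : List Int) (miss sunk hits : List (Int × Int)) (r c : Int)
    (hr : 0 ≤ r ∧ r < 10) (hc : 0 ≤ c ∧ c < 10) :
    pvCellScore ships miss sunk hits r c =
    pvSumAt (pvAllEvs miss sunk (PySem.Set.diff hits sunk) ships) r c := by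
  rw [pvAllEvs, pvSumAt_flatMap, pvCellScore]
  simp only [PySem.List.foldl_add, pvLineWeight_eq]
  rw [show (fun (total : Int) (L : Int) =>
      total + (((PySem.List.pyRange (max 0 (c - L + 1)) (min c (10 - L) + 1)).map
        (fun c0 => if pvValid (pvHCells r c0 L) miss sunk then pvWeight (pvHCells r c0 L) (PySem.Set.diff hits sunk) else 0)).sum) +
      (((PySem.List.pyRange (max 0 (r - L + 1)) (min r (10 - L) + 1)).map
        (fun r0 => if pvValid (pvVCells r0 c L) miss sunk then pvWeight (pvVCells r0 c L) (PySem.Set.diff hits sunk) else 0)).sum)) =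
      (fun total L => total + (pvSumAt (pvHEvs miss sunk (PySem.Set.diff hits sunk) L ++ pvVEvs miss sunk (PySem.Set.diff hits sunk) L) r c)) from ?_, PySem.List.foldl_add]
  · simp
  · funext total L
    rw [pvSumAt_append, pvHSum miss sunk _ L r c hr hc, pvVSum miss sunk _ L r c hr hc]
    ring

-- every event of a placement lies on the board
lemma pvAllEvs_bounds (miss sunk unsunk : List (Int × Int)) (ships : List Int) :
    ∀ e ∈ pvAllEvs miss sunk unsunk ships,
      0 ≤ e.1.1 ∧ e.1.1 < 10 ∧ 0 ≤ e.1.2 ∧ e.1.2 < 10 := by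
  intro e he
  rw [pvAllEvs] at he
  obtain ⟨L, _, he⟩ := List.mem_flatMap.mp he
  have hplace : ∀ (cells : List (Int × Int)), e ∈ pvPlaceEv miss sunk unsunk cells → e.1 ∈ cells := by
    intro cells h
    rw [pvPlaceEv] at h
    split at h
    · obtain ⟨p, hp, rfl⟩ := List.mem_map.mp h
      exact hp
    · cases h
  rcases List.mem_append.mp he with h | h
  · rw [pvHEvs] at h
    obtain ⟨r', hr', h⟩ := List.mem_flatMap.mp h
    obtain ⟨c', hc', h⟩ := List.mem_flatMap.mp h
    have := hplace _ h
    rw [pvHCells] at this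
    obtain ⟨i, hi, hEq⟩ := List.mem_map.mp this
    have h1 := PySem.List.mem_pyRange_one.mp hr'
    have h2 := PySem.List.mem_pyRange_one.mp hc'
    have h3 := PySem.List.mem_pyRange_one.mp hi
    rw [← hEq]
    simp only
    omega
  · rw [pvVEvs] at h
    obtain ⟨r', hr', h⟩ := List.mem_flatMap.mp h
    obtain ⟨c', hc', h⟩ := List.mem_flatMap.mp h
    have := hplace _ h
    rw [pvVCells] at this
    obtain ⟨i, hi, hEq⟩ := List.mem_map.mp this
    have h1 := PySem.List.mem_pyRange_one.mp hr'
    have h2 := PySem.List.mem_pyRange_one.mp hc'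
    have h3 := PySem.List.mem_pyRange_one.mp hi
    rw [← hEq]
    simp only
    omega

-- A's accumulation loops are the event fold
lemma pvPlaceEv_fold (miss sunk unsunk : List (Int × Int)) (cells : List (Int × Int)) (g : List (List Int)) :
    (pvPlaceEv miss sunk unsunk cells).foldl pvStep g =
    if pvValid cells miss sunk then
      cells.foldl (fun g p => pvAdd g p.1 p.2 (pvWeight cells unsunk)) g
    else g := by
  rw [pvPlaceEv]
  split
  · rw [List.foldl_map]
    rfl
  · rfl

lemma pvGrid1_eq (miss sunk unsunk : List (Int × Int)) (ships : List Int) (g0 : List (List Int)) :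
    pvShipsFold miss sunk unsunk ships g0 = (pvAllEvs miss sunk unsunk ships).foldl pvStep g0 := by
  rw [pvShipsFold, pvAllEvs, List.foldl_flatMap]
  congr 1
  funext g L
  rw [List.foldl_append, pvHEvs, pvVEvs]
  simp only [List.foldl_flatMap, pvPlaceEv_fold]

-- shape of the initial grid
lemma pvShape_grid0 : pvShape (List.replicate 10 (List.replicate 10 (0 : Int))) := by
  constructor
  · simp
  · intro n hn
    rw [List.getD_eq_getElem?_getD, List.getElem?_replicate, if_pos (by omega)]
    simp

lemma pvGet_grid0 (r c : Int) : pvGet (List.replicate 10 (List.replicate 10 (0 : Int))) r c = 0 := by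
  have h1 : ∀ n : Nat, (List.replicate 10 (List.replicate 10 (0:Int))).getD n [] =
      if n < 10 then List.replicate 10 (0:Int) else [] := by
    intro n
    rw [List.getD_eq_getElem?_getD, List.getElem?_replicate]
    split <;> rfl
  have h2 : ∀ n : Nat, (List.replicate 10 (0:Int)).getD n 0 = 0 := by
    intro n
    rw [List.getD_eq_getElem?_getD, List.getElem?_replicate]
    split <;> rfl
  rw [pvGet, h1]
  split
  · exact h2 _
  · rfl

lemma pvGetD_eq {α : Type} (l : List α) (d : α) (n : Nat) (h : n < l.length) : l.getD n d = l[n] := by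
  rw [List.getD_eq_getElem?_getD, List.getElem?_eq_getElem h]
  rfl

lemma pvRange10_eq : PySem.List.pyRange (0 : Int) 10 = List.map (fun k => ((k : Nat) : Int)) (List.range 10) := by
  have h := PySem.List.pyRange_zero_natCast 10
  simpa using h

lemma pvMain (board_state : List (List Int)) (remaining_ships : List Int) (miss_cells : List (Int × Int)) (sunk_coords : List (Int × Int)) (hit_cells : List (Int × Int)) :
    build_probability_grid board_state remaining_ships miss_cells sunk_coords hit_cells =
    build_probability_grid_alt board_state remaining_ships miss_cells sunk_coords hit_cells := by
  simp only [build_probability_grid, build_probability_grid_alt]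
  rw [pvGrid1_eq]
  obtain ⟨hsh1, hval1⟩ := pvFold_char
    (pvAllEvs miss_cells sunk_coords (PySem.Set.diff hit_cells sunk_coords) remaining_ships)
    (pvAllEvs_bounds miss_cells sunk_coords (PySem.Set.diff hit_cells sunk_coords) remaining_ships)
    (List.replicate 10 (List.replicate 10 (0 : Int))) pvShape_grid0
  obtain ⟨hsh2, hval2⟩ := pvZeroFold_char (PySem.Set.union miss_cells sunk_coords) _ hsh1
  set G1 := List.foldl pvStep (List.replicate 10 (List.replicate 10 (0 : Int)))
    (pvAllEvs miss_cells sunk_coords (PySem.Set.diff hit_cells sunk_coords) remaining_ships) with hG1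
  set G := List.foldl (fun g p =>
      if 0 ≤ p.1 ∧ p.1 < 10 ∧ 0 ≤ p.2 ∧ p.2 < 10 then pvZero g p.1 p.2 else g) G1
    (PySem.Set.union miss_cells sunk_coords) with hG
  apply List.ext_getElem
  · rw [hsh2.1]
    simp [pvRange10_eq]
  · intro n hn1 hn2
    have hn : n < 10 := by rw [hsh2.1] at hn1; exact hn1
    apply List.ext_getElem
    · rw [← pvGetD_eq _ [] n hn1, hsh2.2 n hn, List.getElem_map]
      simp [pvRange10_eq]
    · intro m hm1 hm2
      have hm : m < 10 := by
        rw [← pvGetD_eq _ [] n hn1, hsh2.2 n hn] at hm1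
        exact hm1
      have hidx : ∀ (k : Nat) (hk : k < (PySem.List.pyRange (0 : Int) 10).length),
          (PySem.List.pyRange (0 : Int) 10)[k] = (k : Int) := by
        intro k hk
        simp [pvRange10_eq]
      simp only [List.getElem_map, hidx]
      have hL : (G[n]'hn1)[m]'hm1 = pvGet G (n : Int) (m : Int) := by
        rw [pvGet, Int.toNat_natCast, Int.toNat_natCast, pvGetD_eq _ [] n hn1, pvGetD_eq _ 0 m hm1]
      rw [hL, hG, hval2 (n : Int) (m : Int) (by omega) (by omega)]
      have hmemb : (((n : Int), (m : Int)) ∈ PySem.Set.union miss_cells sunk_coords) ↔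
          pvBlocked miss_cells sunk_coords ((n : Int), (m : Int)) = true := by
        rw [PySem.Set.mem_union]
        simp [pvBlocked, List.contains_eq_mem]
      by_cases hb : (((n : Int), (m : Int)) : Int × Int) ∈ PySem.Set.union miss_cells sunk_coords
      · rw [if_pos hb, if_pos (hmemb.mp hb)]
      · rw [if_neg hb, if_neg (fun h => hb (hmemb.mpr h)), hG1,
          hval1 (n : Int) (m : Int) (by omega) (by omega), pvGet_grid0,
          pvCellScore_eq remaining_ships miss_cells sunk_coords hit_cells (n : Int) (m : Int)
            (by omega) (by omega)]
        ring

-- ===== VERDICT (by name: the statement is the Claim_ definition above) =====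
theorem build_probability_grid_spec : Claim_equal_build_probability_grid := by
  intro board_state remaining_ships miss_cells sunk_coords hit_cells _
  exact pvMain board_state remaining_ships miss_cells sunk_coords hit_cells
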